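-- pv_equiv track=rewrite | github.com/varadharajaan/aws-infra-setup | asg_cleanup_files.py | group_asgs_by_age
-- ===== SOURCE A (Python) =====
-- def group_asgs_by_age(asg_files):
--     """Group ASGs by age in days"""
--     asgs_by_age = {}
--
--     for asg_info in asg_files:
--         age_days = asg_info['file_age_days']
--
--         if age_days not in asgs_by_age:
--             asgs_by_age[age_days] = []
--
--         asgs_by_age[age_days].append(asg_info)
--
--     return asgs_by_age
-- ===== SOURCE B (Python) =====
-- def group_asgs_by_age(asg_files):
--     """Group ASGs by age in days"""
--     ages = list(dict.fromkeys(info['file_age_days'] for info in asg_files))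
--     return {age: [info for info in asg_files if info['file_age_days'] == age]
--             for age in ages}
-- ===== Notes on version B (the rewrite author's own statement) =====
-- stated objective: alternative
-- what changed: B first dedups the ages in first-occurrence order (dict.fromkeys) and then builds each group by filtering the whole list, replacing A's one-pass membership-test-and-append bucketing.
import Mathlib
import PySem

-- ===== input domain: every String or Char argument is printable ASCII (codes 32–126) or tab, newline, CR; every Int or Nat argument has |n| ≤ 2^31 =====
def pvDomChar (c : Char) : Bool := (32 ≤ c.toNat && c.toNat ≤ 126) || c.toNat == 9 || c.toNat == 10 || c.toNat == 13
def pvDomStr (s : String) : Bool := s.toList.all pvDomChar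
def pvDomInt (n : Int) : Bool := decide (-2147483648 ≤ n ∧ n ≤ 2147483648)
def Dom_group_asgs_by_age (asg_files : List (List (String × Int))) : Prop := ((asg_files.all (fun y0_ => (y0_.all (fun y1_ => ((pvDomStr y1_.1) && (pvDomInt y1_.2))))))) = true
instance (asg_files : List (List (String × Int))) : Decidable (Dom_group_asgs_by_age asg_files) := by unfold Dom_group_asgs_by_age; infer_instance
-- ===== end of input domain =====

-- B dedups the ages in first-occurrence order and builds each group by filtering the list,
-- instead of A's one-pass membership-test-and-append dict bucketing; same cost class, alternative shape.


-- asg_info['file_age_days'] (none = KeyError, excluded by Pre_)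
def pvKeyOf (a : List (String × Int)) : Option Int := (PySem.Dict.mk a).get? "file_age_days"

-- ===== PORT A =====
-- one loop step of A's 'for asg_info in asg_files' body
def pvStepA (d : PySem.Dict Int (List (List (String × Int)))) (a : List (String × Int)) :
    PySem.Dict Int (List (List (String × Int))) :=
  match pvKeyOf a with
  | none => d   -- KeyError in Python; unreachable under Pre_
  | some age =>
    let d1 := if d.contains age then d else d.insert age []   -- if age_days not in asgs_by_age: … = []
    d1.insert age (d1.getD age [] ++ [a])                     -- asgs_by_age[age_days].append(asg_info)

def group_asgs_by_age (asg_files : List (List (String × Int))) : List (Int × List (List (String × Int))) :=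
  (asg_files.foldl pvStepA PySem.Dict.empty).items

-- ===== PORT B =====
def group_asgs_by_age_alt (asg_files : List (List (String × Int))) : List (Int × List (List (String × Int))) :=
  let ages := PySem.List.dedup (asg_files.filterMap pvKeyOf)   -- dict.fromkeys(… for info in asg_files)
  ages.map (fun age => (age, asg_files.filter (fun a => pvKeyOf a == some age)))

-- ===== PRECONDITION & SPEC =====
-- Pre_ excludes exactly the inputs where some record lacks the 'file_age_days' key: there A (and B) raise KeyError.
def Pre_group_asgs_by_age (asg_files : List (List (String × Int))) : Prop :=
  ∀ a ∈ asg_files, (pvKeyOf a).isSome = true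
instance (asg_files : List (List (String × Int))) : Decidable (Pre_group_asgs_by_age asg_files) := by unfold Pre_group_asgs_by_age; infer_instance

def pvWitness_group_asgs_by_age : (List (List (String × Int))) :=
  [[("file_age_days", 2)], [("file_age_days", 1), ("name", 7)], [("file_age_days", 2)]]

def Spec_group_asgs_by_age (asg_files : List (List (String × Int))) (out : List (Int × List (List (String × Int)))) : Prop := out = group_asgs_by_age_alt asg_files
instance (asg_files : List (List (String × Int))) (out : List (Int × List (List (String × Int)))) : Decidable (Spec_group_asgs_by_age asg_files out) := by unfold Spec_group_asgs_by_age; infer_instance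

-- ===== CLAIM (what is proved, stated in full; the proofs are below) =====
def Claim_equal_group_asgs_by_age : Prop := ∀ (asg_files : List (List (String × Int))), Dom_group_asgs_by_age asg_files → Pre_group_asgs_by_age asg_files → Spec_group_asgs_by_age asg_files (group_asgs_by_age asg_files)

-- ===== LEMMAS AND PROOFS =====

-- keys of A's loop: the distinct ages, in first-occurrence order, appended to the starting keys
lemma keys_foldl_stepA (xs : List (List (String × Int))) (d : PySem.Dict Int (List (List (String × Int)))) :
    (xs.foldl pvStepA d).keys = PySem.Set.update d.keys (xs.filterMap pvKeyOf) := by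
  induction xs generalizing d with
  | nil => simp [PySem.Set.update]
  | cons a xs ih =>
    simp only [List.foldl_cons, List.filterMap_cons]
    cases h : pvKeyOf a with
    | none => simp [pvStepA, h, ih]
    | some age =>
      rw [PySem.Set.update_cons, ih]
      congr 1
      by_cases hc : d.contains age = true
      · have hmem : age ∈ d.keys := (PySem.Dict.contains_iff_mem_keys d age).mp hc
        simp [pvStepA, h, hc, PySem.Dict.keys_insert_of_contains, PySem.Set.add, hmem]
      · have hc' : d.contains age = false := by simpa using hc
        have hmem : age ∉ d.keys := fun hm => hc ((PySem.Dict.contains_iff_mem_keys d age).mpr hm)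
        simp [pvStepA, h, hc', PySem.Dict.keys_insert_of_contains,
          PySem.Dict.contains_insert_self, PySem.Dict.keys_insert_of_not_contains,
          PySem.Set.add, hmem]

-- value at k of A's loop: the starting value followed by every record whose age is k
lemma getD_foldl_stepA (xs : List (List (String × Int))) (d : PySem.Dict Int (List (List (String × Int)))) (k : Int) :
    (xs.foldl pvStepA d).getD k [] = d.getD k [] ++ xs.filter (fun a => pvKeyOf a == some k) := by
  induction xs generalizing d with
  | nil => simp
  | cons a xs ih =>
    simp only [List.foldl_cons, List.filter_cons]
    cases h : pvKeyOf a with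
    | none => simp [pvStepA, h, ih]
    | some age =>
      rw [ih]
      by_cases hk : k = age
      · subst hk
        have hval : (pvStepA d a).getD k [] = d.getD k [] ++ [a] := by
          by_cases hc : d.contains k = true
          · simp [pvStepA, h, hc, PySem.Dict.getD_insert_self]
          · have hc' : d.contains k = false := by simpa using hc
            simp [pvStepA, h, hc', PySem.Dict.getD_insert_self,
              PySem.Dict.getD_of_not_contains, hc]
        simp [hval, h]
      · have hval : (pvStepA d a).getD k [] = d.getD k [] := by
          have hne : k ≠ age := hk
          by_cases hc : d.contains age = true
          · simp [pvStepA, h, hc, PySem.Dict.getD_insert_of_ne, hne]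
          · have hc' : d.contains age = false := by simpa using hc
            simp [pvStepA, h, hc', PySem.Dict.getD_insert_of_ne, hne]
        simp only [hval, h]
        simp only [List.append_cancel_left_eq, List.filter_cons]
        have hne : (some age == some k) = false := by
          simp; exact fun hh => hk hh.symm
        simp [hne]

-- ===== VERDICT (by name: the statement is the Claim_ definition above) =====
theorem group_asgs_by_age_spec : Claim_equal_group_asgs_by_age := by
  intro xs _ _
  unfold Spec_group_asgs_by_age group_asgs_by_age group_asgs_by_age_alt
  have hkeys : (xs.foldl pvStepA PySem.Dict.empty).keys
      = PySem.Set.ofList (xs.filterMap pvKeyOf) := by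
    rw [keys_foldl_stepA, PySem.Dict.keys_empty, PySem.Set.update_nil_left]
  have hnodup : (xs.foldl pvStepA PySem.Dict.empty).keys.Nodup := by
    rw [hkeys]; exact PySem.Set.nodup_ofList _
  rw [PySem.Dict.items_eq_map_keys _ hnodup [], hkeys]
  have hofList : PySem.Set.ofList (xs.filterMap pvKeyOf) = PySem.List.dedup (xs.filterMap pvKeyOf) := rfl
  rw [hofList]
  refine List.map_congr_left (fun k _ => ?_)
  rw [getD_foldl_stepA, PySem.Dict.getD_empty]
  simp
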